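-- pv_equiv track=rewrite | github.com/Xtrymas2/CubeWorld-Cracker | Python version/CubeCrack.py | AOBScan
-- ===== SOURCE A (Python) =====
-- def AOBScan(AOB, contents, desiredresult): #Returns address at which the AOB is located.
--     resultnumber = 0
--     address = 0
--     while address <= len(contents)-len(AOB):
--         j=0
--         while j<len(AOB) and contents[address+j]==AOB[j]:
--             j+=1
--             if j == len(AOB):
--                 resultnumber += 1
--                 if resultnumber == desiredresult:
--                     return address
--         address += 1
--     return -1
-- ===== SOURCE B (Python) =====
-- def AOBScan(AOB, contents, desiredresult):  # Returns address at which the AOB is located.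
--     m = len(AOB)
--     positions = [i for i in range(len(contents) - m + 1) if contents[i:i+m] == AOB]
--     if 1 <= desiredresult <= len(positions):
--         return positions[desiredresult - 1]
--     return -1
-- ===== Notes on version B (the rewrite author's own statement) =====
-- stated objective: simpler
-- what changed: Replaces the hand-written nested while-loops with in-loop counter and early return by a single comprehension collecting all match positions via slice comparison, then direct indexing of the k-th one.
-- outside the precondition, e.g. on AOBScan([], [1, 2], 1): A returns -1, B returns 0
import Mathlib
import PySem

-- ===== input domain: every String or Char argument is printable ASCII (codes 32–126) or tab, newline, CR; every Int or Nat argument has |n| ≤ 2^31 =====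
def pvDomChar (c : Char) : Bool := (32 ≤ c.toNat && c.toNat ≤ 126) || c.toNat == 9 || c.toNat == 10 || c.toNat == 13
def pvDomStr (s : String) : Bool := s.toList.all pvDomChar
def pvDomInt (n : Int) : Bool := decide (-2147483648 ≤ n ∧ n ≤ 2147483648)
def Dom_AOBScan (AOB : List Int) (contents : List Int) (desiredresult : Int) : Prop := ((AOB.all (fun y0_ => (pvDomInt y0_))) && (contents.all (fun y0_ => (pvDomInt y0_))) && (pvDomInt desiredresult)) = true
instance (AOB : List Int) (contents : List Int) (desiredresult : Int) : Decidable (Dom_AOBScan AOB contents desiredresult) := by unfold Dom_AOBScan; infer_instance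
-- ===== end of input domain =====

-- B collects all match positions with one slice-comparison comprehension and indexes the k-th,
-- instead of A's nested while-loops with a running counter and early return (objective: simpler).

-- ===== PORT A =====
-- inner while loop (fuel = one unit per condition check, always sufficient at the call site):
-- returns (resultnumber, some address) on an early return, (resultnumber, none) otherwise
def AOBScanInner (AOB : List Int) (contents : List Int) (desiredresult : Int)
    (address : Int) (fuel : Nat) (j : Int) (resultnumber : Int) : Int × Option Int :=
  match fuel with
  | 0 => (resultnumber, none)
  | fuel' + 1 =>
    if j < (AOB.length : Int) ∧
        PySem.List.pyGetD contents (address + j) 0 = PySem.List.pyGetD AOB j 0 then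
      if j + 1 = (AOB.length : Int) then
        if resultnumber + 1 = desiredresult then (resultnumber + 1, some address)
        else AOBScanInner AOB contents desiredresult address fuel' (j + 1) (resultnumber + 1)
      else AOBScanInner AOB contents desiredresult address fuel' (j + 1) resultnumber
    else (resultnumber, none)

-- outer while loop
def AOBScanOuter (AOB : List Int) (contents : List Int) (desiredresult : Int)
    (fuel : Nat) (address : Int) (resultnumber : Int) : Int :=
  match fuel with
  | 0 => -1
  | fuel' + 1 =>
    if address ≤ (contents.length : Int) - (AOB.length : Int) then
      match AOBScanInner AOB contents desiredresult address (AOB.length + 1) 0 resultnumber with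
      | (_, some a) => a
      | (r', none) => AOBScanOuter AOB contents desiredresult fuel' (address + 1) r'
    else -1

def AOBScan (AOB : List Int) (contents : List Int) (desiredresult : Int) : Int :=
  AOBScanOuter AOB contents desiredresult (contents.length + 1) 0 0

-- ===== PORT B =====
def AOBScan_alt (AOB : List Int) (contents : List Int) (desiredresult : Int) : Int :=
  let m : Int := AOB.length
  let positions :=
    (PySem.List.pyRange 0 ((contents.length : Int) - m + 1) 1).filter
      (fun i => PySem.List.slice contents (some i) (some (i + m)) == AOB)
  if 1 ≤ desiredresult ∧ desiredresult ≤ (positions.length : Int) then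
    (PySem.List.pyGet? positions (desiredresult - 1)).getD (-1)
  else -1

-- ===== PRECONDITION & SPEC =====
-- Pre_ excludes only the degenerate corner of an empty pattern AOB = [] with desiredresult between
-- 1 and len(contents)+1, on which A's unconditional -1 and B's "the empty pattern matches at every
-- address" (returning desiredresult-1) are both defensible conventions that no caller would rely on.
def Pre_AOBScan (AOB : List Int) (contents : List Int) (desiredresult : Int) : Prop :=
  AOB ≠ [] ∨ ¬(1 ≤ desiredresult ∧ desiredresult ≤ (contents.length : Int) + 1)
instance (AOB : List Int) (contents : List Int) (desiredresult : Int) : Decidable (Pre_AOBScan AOB contents desiredresult) := by unfold Pre_AOBScan; infer_instance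

def pvWitness_AOBScan : List Int × List Int × Int := ([1, 2], [0, 1, 2, 1, 2], 2)

def Spec_AOBScan (AOB : List Int) (contents : List Int) (desiredresult : Int) (out : Int) : Prop := out = AOBScan_alt AOB contents desiredresult
instance (AOB : List Int) (contents : List Int) (desiredresult : Int) (out : Int) : Decidable (Spec_AOBScan AOB contents desiredresult out) := by unfold Spec_AOBScan; infer_instance

-- ===== CLAIM (what is proved, stated in full; the proofs are below) =====
def Claim_equal_AOBScan : Prop := ∀ (AOB : List Int) (contents : List Int) (desiredresult : Int), Dom_AOBScan AOB contents desiredresult → Pre_AOBScan AOB contents desiredresult → Spec_AOBScan AOB contents desiredresult (AOBScan AOB contents desiredresult)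

-- ===== LEMMAS AND PROOFS =====

-- the match positions of AOB in contents at addresses ≥ a, exactly as B builds them
def posFrom (AOB : List Int) (contents : List Int) (a : Int) : List Int :=
  (PySem.List.pyRange a ((contents.length : Int) - (AOB.length : Int) + 1) 1).filter
    (fun i => PySem.List.slice contents (some i) (some (i + (AOB.length : Int))) == AOB)


-- slice xs i i is empty
theorem slice_nil_of (xs : List Int) (b : Int) (h : 0 ≤ b) :
    PySem.List.slice xs (some b) (some b) = [] := by
  rw [PySem.List.slice_toNat xs h h]; simp

-- peel the first element off a slice
theorem slice_cons (xs : List Int) (i b : Int) (h0 : 0 ≤ i) (hib : i < b)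
    (hin : i.toNat < xs.length) :
    PySem.List.slice xs (some i) (some b) = xs[i.toNat] :: PySem.List.slice xs (some (i + 1)) (some b) := by
  rw [PySem.List.slice_toNat xs h0 (by omega), PySem.List.slice_toNat xs (by omega) (by omega)]
  rw [List.drop_eq_getElem_cons hin]
  have h1 : (i + 1).toNat = i.toNat + 1 := by omega
  have h2 : b.toNat - i.toNat = (b.toNat - (i + 1).toNat) + 1 := by omega
  rw [h2, List.take_succ_cons, h1]

theorem posFrom_nil (AOB contents : List Int) (a : Int)
    (h : (contents.length : Int) - (AOB.length : Int) + 1 ≤ a) :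
    posFrom AOB contents a = [] := by
  rw [posFrom, PySem.List.pyRange_one_eq_nil h]; rfl

theorem posFrom_cons (AOB contents : List Int) (a : Int)
    (h : a ≤ (contents.length : Int) - (AOB.length : Int)) :
    posFrom AOB contents a =
      (if PySem.List.slice contents (some a) (some (a + (AOB.length : Int))) = AOB
       then [a] else []) ++ posFrom AOB contents (a + 1) := by
  rw [posFrom, PySem.List.pyRange_one_cons (by omega), List.filter_cons]
  split_ifs with h1 h2 h2
  · rfl
  · exact absurd (eq_of_beq h1) h2
  · exact absurd (beq_of_eq h2) (by simpa using h1)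
  · rfl

theorem inner_spec (AOB contents : List Int) (d a : Int) (ha : 0 ≤ a)
    (hub : a ≤ (contents.length : Int) - (AOB.length : Int)) :
    ∀ (fuel : Nat) (jn : Nat) (r : Int), AOB.length - jn < fuel → jn < AOB.length →
      AOBScanInner AOB contents d a fuel (jn : Int) r =
        if PySem.List.slice contents (some (a + (jn : Int))) (some (a + (AOB.length : Int)))
            = AOB.drop jn
        then (r + 1, if r + 1 = d then some a else none) else (r, none) := by
  intro fuel
  induction fuel with
  | zero => intro jn r hfuel hj; omega
  | succ k ih =>
    intro jn r hfuel hj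
    have hjI : (jn : Int) < (AOB.length : Int) := by exact_mod_cast hj
    have hann : a + (jn : Int) < (contents.length : Int) := by omega
    have hin : (a + (jn : Int)).toNat < contents.length := by omega
    have hget1 : PySem.List.pyGetD contents (a + (jn : Int)) 0 = contents[(a + (jn : Int)).toNat] :=
      PySem.List.pyGetD_eq_getElem contents 0 (by omega) hann
    have hget2 : PySem.List.pyGetD AOB ((jn : Nat) : Int) 0 = AOB[jn] :=
      PySem.List.pyGetD_ofNat AOB jn 0 hj
    rw [AOBScanInner]
    rw [slice_cons contents (a + (jn : Int)) (a + (AOB.length : Int)) (by omega) (by omega) hin]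
    rw [List.drop_eq_getElem_cons hj]
    by_cases heq : contents[(a + (jn : Int)).toNat] = AOB[jn]
    · by_cases hlast : (jn : Int) + 1 = (AOB.length : Int)
      · have heqm : a + (jn : Int) + 1 = a + (AOB.length : Int) := by omega
        have htailnil : PySem.List.slice contents (some (a + (jn : Int) + 1))
            (some (a + (AOB.length : Int))) = [] := by
          rw [heqm]; exact slice_nil_of _ _ (by omega)
        have hdropnil : AOB.drop (jn + 1) = [] := List.drop_eq_nil_of_le (by omega)
        have hcond : contents[(a + (jn : Int)).toNat] :: ([] : List Int) = AOB[jn] :: [] := by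
          rw [heq]
        rw [if_pos ⟨hjI, by rw [hget1, hget2, heq]⟩, if_pos hlast, htailnil, hdropnil,
            if_pos hcond]
        by_cases hd : r + 1 = d
        · rw [if_pos hd, if_pos hd]
        · rw [if_neg hd, if_neg hd]
          match k with
          | 0 => rfl
          | k' + 1 =>
            rw [AOBScanInner, if_neg (fun hcon => absurd hcon.1 (by omega))]
      · rw [if_pos ⟨hjI, by rw [hget1, hget2, heq]⟩, if_neg hlast]
        have hcast : ((jn : Int) + 1) = ((jn + 1 : Nat) : Int) := by push_cast; ring
        rw [hcast, ih (jn + 1) r (by omega) (by omega)]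
        have hc2 : a + ((jn + 1 : Nat) : Int) = a + (jn : Int) + 1 := by push_cast; ring
        rw [hc2]
        simp only [List.cons.injEq, heq, true_and]
    · rw [if_neg (by rw [hget1, hget2]; exact fun hc => heq hc.2)]
      rw [if_neg (by simp only [List.cons.injEq]; exact fun hc => heq hc.1)]

theorem outer_spec (AOB contents : List Int) (d : Int) (hA : AOB ≠ []) :
    ∀ (fuel : Nat) (a r : Int), 0 ≤ a →
      (((contents.length : Int) - (AOB.length : Int) + 1 - a).toNat ≤ fuel) →
      AOBScanOuter AOB contents d fuel a r =
        if 1 ≤ d - r ∧ d - r ≤ ((posFrom AOB contents a).length : Int) then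
          (PySem.List.pyGet? (posFrom AOB contents a) (d - r - 1)).getD (-1)
        else -1 := by
  intro fuel
  have hm : 0 < AOB.length := List.length_pos_iff.mpr hA
  induction fuel with
  | zero =>
    intro a r ha hfuel
    rw [posFrom_nil AOB contents a (by omega)]
    rw [if_neg (by simp; omega)]
    rfl
  | succ k ih =>
    intro a r ha hfuel
    by_cases hle : a ≤ (contents.length : Int) - (AOB.length : Int)
    · have hinner := inner_spec AOB contents d a ha hle (AOB.length + 1) 0 r (by omega) hm
      rw [Nat.cast_zero, add_zero, List.drop_zero] at hinner
      rw [AOBScanOuter, if_pos hle, hinner]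
      by_cases hmatch : PySem.List.slice contents (some a) (some (a + (AOB.length : Int))) = AOB
      · rw [if_pos hmatch, posFrom_cons AOB contents a hle, if_pos hmatch, List.singleton_append]
        by_cases hd : r + 1 = d
        · rw [if_pos hd]
          dsimp only
          rw [if_pos ⟨by omega, by simp only [List.length_cons]; push_cast; omega⟩]
          have h0 : d - r - 1 = 0 := by omega
          rw [h0, PySem.List.pyGet?_zero_cons]
          rfl
        · rw [if_neg hd]
          dsimp only
          rw [ih (a + 1) (r + 1) (by omega) (by omega)]
          set t := posFrom AOB contents (a + 1) with ht
          by_cases hc : 1 ≤ d - (r + 1) ∧ d - (r + 1) ≤ (t.length : Int)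
          · rw [if_pos hc, if_pos (by simp only [List.length_cons]; push_cast; omega)]
            rw [PySem.List.pyGet?_of_nonneg t (by omega : (0:Int) ≤ d - (r + 1) - 1),
                PySem.List.pyGet?_of_nonneg (a :: t) (by omega : (0:Int) ≤ d - r - 1)]
            have h3 : (d - r - 1).toNat = (d - (r + 1) - 1).toNat + 1 := by omega
            rw [h3, List.getElem?_cons_succ]
          · rw [if_neg hc, if_neg (by simp only [List.length_cons]; push_cast; omega)]
      · rw [if_neg hmatch, posFrom_cons AOB contents a hle, if_neg hmatch, List.nil_append]
        dsimp only
        exact ih (a + 1) r (by omega) (by omega)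
    · rw [AOBScanOuter, if_neg hle, posFrom_nil AOB contents a (by omega)]
      rw [if_neg (by simp; omega)]

-- ===== VERDICT (by name: the statement is the Claim_ definition above) =====
-- with the empty pattern, A's outer loop never finds a match and falls through to -1
theorem outer_empty (contents : List Int) (d : Int) :
    ∀ (fuel : Nat) (a r : Int), AOBScanOuter [] contents d fuel a r = -1 := by
  intro fuel
  induction fuel with
  | zero => intro a r; rfl
  | succ k ih =>
    intro a r
    have hno : ¬((0 : Int) < ((List.length ([] : List Int) : Nat) : Int) ∧
        PySem.List.pyGetD contents (a + 0) 0 = PySem.List.pyGetD ([] : List Int) 0 0) := by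
      simp
    rw [AOBScanOuter, AOBScanInner, if_neg hno]
    dsimp only
    split_ifs with h
    · exact ih (a + 1) r
    · rfl

-- with the empty pattern, B's slice comparison succeeds at every address, so positions has
-- length len(contents)+1 and an out-of-range desiredresult yields -1
theorem alt_empty (contents : List Int) (d : Int)
    (hd : ¬(1 ≤ d ∧ d ≤ (contents.length : Int) + 1)) : AOBScan_alt [] contents d = -1 := by
  have hfil : (PySem.List.pyRange 0 ((contents.length : Int) + 1) 1).filter
      (fun i => PySem.List.slice contents (some i) (some i) == ([] : List Int)) =
      PySem.List.pyRange 0 ((contents.length : Int) + 1) 1 := by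
    apply List.filter_eq_self.mpr
    intro x hx
    have hx0 : 0 ≤ x := by
      have := (PySem.List.mem_pyRange_one).mp hx
      omega
    simpa using slice_nil_of contents x hx0
  unfold AOBScan_alt
  simp only [List.length_nil, Nat.cast_zero, sub_zero, add_zero]
  rw [hfil, if_neg (by rw [PySem.List.length_pyRange_one]; intro h; exact hd ⟨h.1, by omega⟩)]

theorem AOBScan_spec : Claim_equal_AOBScan := by
  intro AOB contents d _ hPre
  unfold Spec_AOBScan AOBScan
  by_cases hA : AOB = []
  · have hd : ¬(1 ≤ d ∧ d ≤ (contents.length : Int) + 1) :=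
      hPre.resolve_left (by simp [hA])
    subst hA
    rw [outer_empty contents d (contents.length + 1) 0 0, alt_empty contents d hd]
  · have hm : 0 < AOB.length := List.length_pos_iff.mpr hA
    unfold AOBScan_alt
    rw [outer_spec AOB contents d hA (contents.length + 1) 0 0 le_rfl (by omega)]
    simp [posFrom]
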